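-- pv_equiv track=rewrite | github.com/Nyanyan/ShallowCubeA | two_phase/legacy/20211018/basic_functions.py | rev_move_dir
-- ===== SOURCE A (Python) =====
-- change_direction_x = (20, 5, 18, 15, 23, 9, 19, 3, 22, 13, 16, 7, 21, 1, 17, 11, 0, 4, 8, 12, 10, 6, 2, 14)
--
-- def rev_move_dir(direction, arm_twist):
--     if arm_twist >= 12:
--         if arm_twist == 12: # x
--             for _ in range(3):
--                 direction = change_direction_x[direction]
--         else: # z
--             for _ in range(3):
--                 direction = direction // 4 * 4 + (direction % 4 + 1) % 4
--     return direction
-- ===== SOURCE B (Python) =====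
-- # B: table lookup / closed form instead of 3-step loops; same IndexError parity (rev_x has 24 entries).
-- rev_x = (16, 13, 22, 7, 17, 1, 21, 11, 18, 5, 20, 15, 19, 9, 23, 3, 10, 14, 2, 6, 0, 12, 8, 4)
--
-- def rev_move_dir(direction, arm_twist):
--     if arm_twist >= 12:
--         if arm_twist == 12:  # x: triple permutation precomposed into one table
--             direction = rev_x[direction]
--         else:  # z: three +1 (mod 4) steps collapse to +3 (mod 4)
--             direction = direction // 4 * 4 + (direction % 4 + 3) % 4
--     return direction
-- ===== Notes on version B (the rewrite author's own statement) =====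
-- stated objective: simpler
-- what changed: The x-branch's three table lookups are replaced by one lookup in a precomputed table equal to the triple composition of change_direction_x, and the z-branch's three-iteration loop by the closed form direction//4*4+(direction%4+3)%4.
import Mathlib
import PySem

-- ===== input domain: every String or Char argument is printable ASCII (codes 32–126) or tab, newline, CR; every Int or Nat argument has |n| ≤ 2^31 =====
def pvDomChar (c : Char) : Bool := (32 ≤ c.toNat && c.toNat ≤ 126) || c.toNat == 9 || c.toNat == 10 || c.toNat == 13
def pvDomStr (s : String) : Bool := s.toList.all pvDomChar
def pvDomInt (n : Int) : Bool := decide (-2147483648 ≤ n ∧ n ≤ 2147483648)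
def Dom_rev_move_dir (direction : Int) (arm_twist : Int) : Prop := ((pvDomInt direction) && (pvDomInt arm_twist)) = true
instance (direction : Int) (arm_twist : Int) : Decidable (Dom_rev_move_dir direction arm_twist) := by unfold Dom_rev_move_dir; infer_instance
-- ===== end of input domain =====

-- B replaces the x-branch's three-iteration lookup loop by one precomposed table lookup and the
-- z-branch's loop by a single closed form (simpler; same O(1) cost).

-- ===== PORT A =====
def pvCdx : List Int :=
  [20, 5, 18, 15, 23, 9, 19, 3, 22, 13, 16, 7, 21, 1, 17, 11, 0, 4, 8, 12, 10, 6, 2, 14]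

def rev_move_dir (direction : Int) (arm_twist : Int) : Int :=
  if arm_twist ≥ 12 then
    if arm_twist = 12 then -- x
      List.foldl (fun d _ => (PySem.List.pyGet? pvCdx d).getD 0) direction
        (PySem.List.pyRange 0 3 1)
    else -- z
      List.foldl
        (fun d _ => PySem.Int.floordiv d 4 * 4 + PySem.Int.mod (PySem.Int.mod d 4 + 1) 4)
        direction (PySem.List.pyRange 0 3 1)
  else direction

-- ===== PORT B =====
def pvRevX : List Int :=
  [16, 13, 22, 7, 17, 1, 21, 11, 18, 5, 20, 15, 19, 9, 23, 3, 10, 14, 2, 6, 0, 12, 8, 4]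

def rev_move_dir_alt (direction : Int) (arm_twist : Int) : Int :=
  if arm_twist ≥ 12 then
    if arm_twist = 12 then
      (PySem.List.pyGet? pvRevX direction).getD 0
    else
      PySem.Int.floordiv direction 4 * 4 + PySem.Int.mod (PySem.Int.mod direction 4 + 3) 4
  else direction

-- ===== PRECONDITION & SPEC =====
-- Pre_ excludes exactly the inputs where A raises IndexError: arm_twist == 12 with direction
-- outside the 24-entry table's index range (Python negative indices -24..-1 wrap and are admitted).
def Pre_rev_move_dir (direction : Int) (arm_twist : Int) : Prop :=
  arm_twist = 12 → (-24 ≤ direction ∧ direction < 24)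
instance (direction : Int) (arm_twist : Int) : Decidable (Pre_rev_move_dir direction arm_twist) := by
  unfold Pre_rev_move_dir; infer_instance

def pvWitness_rev_move_dir : Int × Int := (5, 12)

def Spec_rev_move_dir (direction : Int) (arm_twist : Int) (out : Int) : Prop :=
  out = rev_move_dir_alt direction arm_twist
instance (direction : Int) (arm_twist : Int) (out : Int) : Decidable (Spec_rev_move_dir direction arm_twist out) := by
  unfold Spec_rev_move_dir; infer_instance

-- ===== CLAIM (what is proved, stated in full; the proofs are below) =====
def Claim_equal_rev_move_dir : Prop := ∀ (direction : Int) (arm_twist : Int), Dom_rev_move_dir direction arm_twist → Pre_rev_move_dir direction arm_twist → Spec_rev_move_dir direction arm_twist (rev_move_dir direction arm_twist)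

-- ===== LEMMAS AND PROOFS =====

-- the x case: on every in-range index the triple lookup equals the precomposed table
theorem pv_x_case (d : Int) (h1 : -24 ≤ d) (h2 : d < 24) :
    List.foldl (fun d _ => (PySem.List.pyGet? pvCdx d).getD 0) d (PySem.List.pyRange 0 3 1)
      = (PySem.List.pyGet? pvRevX d).getD 0 := by
  interval_cases d <;> decide

-- the z case: three +1 (mod 4) steps collapse to +3 (mod 4)
theorem pv_z_case (d : Int) :
    List.foldl
      (fun d _ => PySem.Int.floordiv d 4 * 4 + PySem.Int.mod (PySem.Int.mod d 4 + 1) 4)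
      d (PySem.List.pyRange 0 3 1)
      = PySem.Int.floordiv d 4 * 4 + PySem.Int.mod (PySem.Int.mod d 4 + 3) 4 := by
  have hfd : ∀ x : Int, PySem.Int.floordiv x 4 = x / 4 := fun x =>
    PySem.Int.floordiv_eq_ediv_of_pos (by norm_num)
  have hmd : ∀ x : Int, PySem.Int.mod x 4 = x % 4 := fun x =>
    PySem.Int.mod_eq_emod_of_pos (by norm_num)
  have hr : PySem.List.pyRange 0 3 1 = [0, 1, 2] := by decide
  rw [hr]
  simp only [List.foldl, hfd, hmd]
  omega

theorem rev_move_dir_spec : Claim_equal_rev_move_dir := by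
  intro d a _ hpre
  unfold Spec_rev_move_dir rev_move_dir rev_move_dir_alt
  split_ifs with h1 h2
  · obtain ⟨hl, hr⟩ := hpre h2
    exact pv_x_case d hl hr
  · exact pv_z_case d
  · rfl
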